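-- pv_equiv track=rewrite | github.com/NBGamer99/HackThon-OpenSource11-Winners | app/Home/views.py | check_and_factorize
-- ===== SOURCE A (Python) =====
-- def check_and_factorize(n):
--     if n > 3:
--         factors = []
--         for i in [3, 2, 1]:
--             while n >= i:
--                 factors.append(i)
--                 n -= i
--         return factors
--     else:
--         return n
-- ===== SOURCE B (Python) =====
-- def check_and_factorize(n):
--     if n > 3:
--         q, r = divmod(n, 3)
--         return [3] * q + ([r] if r else [])
--     else:
--         return n
-- ===== Notes on version B (the rewrite author's own statement) =====
-- stated objective: simpler
-- what changed: Replaces the two nested while-loops with a single divmod: q copies of 3 plus the remainder (1 or 2) as a single trailing element.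
-- outside the precondition, e.g. on check_and_factorize(2): A returns 2, B returns 2; on check_and_factorize(3): A returns 3, B returns 3
import Mathlib
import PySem

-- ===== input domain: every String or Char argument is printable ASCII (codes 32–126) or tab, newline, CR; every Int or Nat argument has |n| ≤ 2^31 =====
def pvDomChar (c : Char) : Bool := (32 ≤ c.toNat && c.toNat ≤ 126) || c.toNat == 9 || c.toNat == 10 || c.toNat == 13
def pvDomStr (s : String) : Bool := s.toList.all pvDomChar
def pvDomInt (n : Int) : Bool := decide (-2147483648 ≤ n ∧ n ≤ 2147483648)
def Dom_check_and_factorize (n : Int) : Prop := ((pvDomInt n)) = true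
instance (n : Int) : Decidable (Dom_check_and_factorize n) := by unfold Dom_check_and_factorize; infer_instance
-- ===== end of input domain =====

-- B replaces A's two nested while-loops by one divmod (q copies of 3 plus the remainder), for simplicity.
-- Pre_ excludes n ≤ 3, where the Python A returns the bare int n, not a list (no value of the declared type).


-- ===== PORT A =====
-- 'while n >= i: factors.append(i); n -= i'  (the '1 ≤ i' conjunct only makes the loop total; it holds for i = 3, 2, 1)
def whileAppend (i n : Int) (acc : List Int) : List Int × Int :=
  if _h : i ≤ n ∧ 1 ≤ i then whileAppend i (n - i) (acc ++ [i]) else (acc, n)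
termination_by n.toNat
decreasing_by omega

def check_and_factorize (n : Int) : List Int :=
  if n > 3 then
    (([3, 2, 1] : List Int).foldl (fun s i => whileAppend i s.2 s.1) (([] : List Int), n)).1
  else []  -- Python returns the bare int n here (not a list); excluded by Pre_

-- ===== PORT B =====
def check_and_factorize_alt (n : Int) : List Int :=
  if n > 3 then
    let q := PySem.Int.floordiv n 3
    let r := PySem.Int.mod n 3
    List.replicate q.toNat 3 ++ (if r ≠ 0 then [r] else [])
  else []  -- Python B returns the bare int n here (not a list); excluded by Pre_

-- ===== PRECONDITION & SPEC =====
-- For n ≤ 3 the Python A (and B) return the int n itself, not a list, so no List Int value exists to claim.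
def Pre_check_and_factorize (n : Int) : Prop := 3 < n
instance (n : Int) : Decidable (Pre_check_and_factorize n) := by unfold Pre_check_and_factorize; infer_instance
def pvWitness_check_and_factorize : Int := (7)

def Spec_check_and_factorize (n : Int) (out : List Int) : Prop := out = check_and_factorize_alt n
instance (n : Int) (out : List Int) : Decidable (Spec_check_and_factorize n out) := by unfold Spec_check_and_factorize; infer_instance

-- ===== CLAIM (what is proved, stated in full; the proofs are below) =====
def Claim_equal_check_and_factorize : Prop := ∀ (n : Int), Dom_check_and_factorize n → Pre_check_and_factorize n → Spec_check_and_factorize n (check_and_factorize n)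

-- ===== LEMMAS AND PROOFS =====
lemma whileAppend_three : ∀ (k : Nat) (n : Int), n.toNat ≤ k → 0 ≤ n → ∀ acc,
    whileAppend 3 n acc = (acc ++ List.replicate (n / 3).toNat 3, n % 3) := by
  intro k
  induction k with
  | zero =>
      intro n hk hn acc
      have hn0 : n = 0 := by omega
      subst hn0
      rw [whileAppend]
      norm_num
  | succ k ih =>
      intro n hk hn acc
      by_cases h3 : 3 ≤ n
      · rw [whileAppend]
        have hcond : (3 : Int) ≤ n ∧ (1 : Int) ≤ 3 := ⟨h3, by norm_num⟩
        rw [dif_pos hcond]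
        rw [ih (n - 3) (by omega) (by omega)]
        have hq : (n / 3).toNat = ((n - 3) / 3).toNat + 1 := by omega
        have hm : (n - 3) % 3 = n % 3 := by omega
        rw [hq, hm, List.replicate_succ]
        simp
      · rw [whileAppend]
        have hq : (n / 3).toNat = 0 := by omega
        have hm : n % 3 = n := by omega
        rw [dif_neg (by omega), hq, hm]
        simp

theorem check_and_factorize_spec : Claim_equal_check_and_factorize := by
  intro n _ hpre
  unfold Pre_check_and_factorize at hpre
  unfold Spec_check_and_factorize check_and_factorize check_and_factorize_alt
  rw [if_pos hpre, if_pos hpre]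
  rw [PySem.Int.floordiv_eq_ediv_of_pos (by norm_num), PySem.Int.mod_eq_emod_of_pos (by norm_num)]
  simp only [List.foldl]
  rw [whileAppend_three n.toNat n (le_refl _) (by omega)]
  have hr : n % 3 = 0 ∨ n % 3 = 1 ∨ n % 3 = 2 := by omega
  rcases hr with h | h | h <;> rw [h] <;>
    simp [whileAppend]
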